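-- pv_equiv track=rewrite | github.com/HyeonsuIm/Algorithm_study | bkjn13549_hide_seek.py | make_same_length
-- ===== SOURCE A (Python) =====
-- def make_same_length(start_bin, target_bin):
--     start_len = len(start_bin)
--     target_len = len(target_bin)
--     move_cnt=0
--     current_move_cnt = 0
--     for i in range(start_len):
--         current_move_cnt *=2
--         if start_bin[i] != target_bin[i]:
--             if target_bin[i] == 1:
--                 current_move_cnt+=1
--             else:
--                 current_move_cnt-=1
--             start_bin[i] =target_bin[i]
--     move_cnt += abs(current_move_cnt)
--     while True:
--         if start_len == target_len:
--             break
--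
--         start_bin.append(target_bin[start_len])
--         if target_bin[start_len] == 1:
--             move_cnt+=1
--         start_len+=1
--     return move_cnt
-- ===== SOURCE B (Python) =====
-- def make_same_length(start_bin, target_bin):
--     # Divide-and-conquer: the signed prefix value is computed recursively by
--     # halving the index range (value = left * 2^len(right) + right), instead of
--     # A's left-to-right doubling loop.  Same in-place effect on start_bin as A
--     # (after A, start_bin == target_bin), done here as one slice assignment.
--     def signed(lo, hi):
--         if hi - lo == 0:
--             return 0
--         if hi - lo == 1:
--             s, t = start_bin[lo], target_bin[lo]
--             if s == t:
--                 return 0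
--             return 1 if t == 1 else -1
--         mid = (lo + hi) // 2
--         return signed(lo, mid) * (1 << (hi - mid)) + signed(mid, hi)
--
--     n = len(start_bin)
--     moves = abs(signed(0, n)) + target_bin[n:].count(1)
--     start_bin[:] = target_bin
--     return moves
-- ===== Notes on version B (the rewrite author's own statement) =====
-- stated objective: alternative
-- what changed: Computes the signed prefix value by divide-and-conquer recursion on index ranges (left half * 2^len(right half) + right half) instead of A's left-to-right Horner doubling loop, counts the tail's ones with list.count on a slice instead of a while-append loop, and replaces the per-index writes by one slice assignment.
import Mathlib
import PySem

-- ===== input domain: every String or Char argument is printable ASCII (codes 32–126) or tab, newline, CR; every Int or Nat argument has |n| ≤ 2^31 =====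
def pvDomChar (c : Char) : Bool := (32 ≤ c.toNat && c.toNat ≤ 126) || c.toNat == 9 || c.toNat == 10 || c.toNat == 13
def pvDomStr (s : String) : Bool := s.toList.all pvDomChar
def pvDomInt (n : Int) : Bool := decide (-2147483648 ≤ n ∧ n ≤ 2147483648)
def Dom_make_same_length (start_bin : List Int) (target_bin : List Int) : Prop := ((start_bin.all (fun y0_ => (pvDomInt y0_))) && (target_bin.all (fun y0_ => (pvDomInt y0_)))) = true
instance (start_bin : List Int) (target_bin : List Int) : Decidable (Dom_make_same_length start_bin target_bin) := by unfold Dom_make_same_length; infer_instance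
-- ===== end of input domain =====

-- B computes the signed prefix value by divide-and-conquer recursion on index ranges
-- instead of A's left-to-right doubling loop, and counts the tail's ones with count on a
-- slice instead of a while-append loop.  Equivalence is about the return value; both
-- Pythons mutate start_bin in place (both leave start_bin equal to target_bin).

-- ===== PORT A =====
-- Literal port of A; the in-place writes start_bin[i] = target_bin[i] do not affect the
-- return value (each index is read once, before it is written) and are dropped.
def make_same_length (start_bin : List Int) (target_bin : List Int) : Int :=
  let start_len := start_bin.length
  let target_len := target_bin.length
  let current_move_cnt : Int :=
    (List.range start_len).foldl (fun (c : Int) (i : Nat) =>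
      let c := c * 2
      if PySem.List.pyGetD start_bin (i : Int) 0 ≠ PySem.List.pyGetD target_bin (i : Int) 0 then
        (if PySem.List.pyGetD target_bin (i : Int) 0 = 1 then c + 1 else c - 1)
      else c) 0
  let move_cnt : Int := |current_move_cnt|
  -- the while loop appends target_bin[start_len..target_len) and counts its ones
  (PySem.List.pyRange (start_len : Int) (target_len : Int) 1).foldl
    (fun m k => if PySem.List.pyGetD target_bin k 0 = 1 then m + 1 else m) move_cnt

-- ===== PORT B =====
-- B's inner recursive helper `signed(lo, hi)`: divide-and-conquer over the index range.
def pvSigned (sb tb : List Int) (lo hi : Nat) : Int :=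
  if hi - lo = 0 then 0
  else if hi - lo = 1 then
    let s := PySem.List.pyGetD sb (lo : Int) 0
    let t := PySem.List.pyGetD tb (lo : Int) 0
    if s = t then 0 else if t = 1 then 1 else -1
  else
    let mid := (lo + hi) / 2
    pvSigned sb tb lo mid * 2 ^ (hi - mid) + pvSigned sb tb mid hi
  termination_by hi - lo
  decreasing_by all_goals omega

def make_same_length_alt (start_bin : List Int) (target_bin : List Int) : Int :=
  let n := start_bin.length
  -- target_bin[n:] with n = len(start_bin) ≥ 0 is exactly drop n
  |pvSigned start_bin target_bin 0 n| + ((PySem.List.count (target_bin.drop n) 1 : Nat) : Int)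

-- ===== PRECONDITION & SPEC =====
-- Pre_ excludes exactly the inputs where A raises IndexError: start_bin longer than target_bin.
def Pre_make_same_length (start_bin : List Int) (target_bin : List Int) : Prop :=
  start_bin.length ≤ target_bin.length
instance (start_bin : List Int) (target_bin : List Int) : Decidable (Pre_make_same_length start_bin target_bin) := by unfold Pre_make_same_length; infer_instance
def pvWitness_make_same_length : List Int × List Int := ([0, 1], [1, 0, 1])

def Spec_make_same_length (start_bin : List Int) (target_bin : List Int) (out : Int) : Prop := out = make_same_length_alt start_bin target_bin
instance (start_bin : List Int) (target_bin : List Int) (out : Int) : Decidable (Spec_make_same_length start_bin target_bin out) := by unfold Spec_make_same_length; infer_instance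

-- ===== CLAIM =====
def Claim_equal_make_same_length : Prop := ∀ (start_bin : List Int) (target_bin : List Int), Dom_make_same_length start_bin target_bin → Pre_make_same_length start_bin target_bin → Spec_make_same_length start_bin target_bin (make_same_length start_bin target_bin)

-- ===== LEMMAS AND PROOFS =====

-- the contribution of position i (0, +1 or -1)
def pvD (start_bin target_bin : List Int) (i : Nat) : Int :=
  if PySem.List.pyGetD start_bin (i : Int) 0 ≠ PySem.List.pyGetD target_bin (i : Int) 0 then
    (if PySem.List.pyGetD target_bin (i : Int) 0 = 1 then 1 else -1)
  else 0

-- A's Horner-style doubling loop computes the weighted sum over the first n positions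
theorem pv_horner (sb tb : List Int) : ∀ (n : Nat) (c : Int),
    (List.range n).foldl (fun (c : Int) (i : Nat) =>
      let c := c * 2
      if PySem.List.pyGetD sb (i : Int) 0 ≠ PySem.List.pyGetD tb (i : Int) 0 then
        (if PySem.List.pyGetD tb (i : Int) 0 = 1 then c + 1 else c - 1)
      else c) c
    = c * 2 ^ n + ((List.range n).map (fun i => pvD sb tb i * 2 ^ (n - 1 - i))).sum := by
  intro n
  induction n with
  | zero => intro c; simp
  | succ n ih =>
    intro c
    rw [List.range_succ, List.foldl_append, List.map_append, List.sum_append, ih]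
    have hshift : (List.range n).map (fun i => pvD sb tb i * 2 ^ (n + 1 - 1 - i))
        = (List.range n).map (fun i => 2 * (pvD sb tb i * 2 ^ (n - 1 - i))) := by
      apply List.map_congr_left
      intro i hi
      have hi' : i < n := List.mem_range.mp hi
      have h2 : n + 1 - 1 - i = (n - 1 - i) + 1 := by omega
      rw [h2]; ring
    rw [hshift, List.sum_map_mul_left (List.range n) (fun i => pvD sb tb i * 2 ^ (n - 1 - i)) 2]
    have hn0 : n + 1 - 1 - n = 0 := by omega
    simp only [List.foldl_cons, List.foldl_nil, List.map_cons, List.map_nil, List.sum_cons,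
      List.sum_nil, hn0, pow_zero, mul_one, pvD]
    split_ifs <;> ring

-- B's divide-and-conquer recursion computes the same weighted sum over [lo, lo+k)
theorem pv_signed_sum (sb tb : List Int) : ∀ (k lo : Nat),
    pvSigned sb tb lo (lo + k)
      = ((List.range' lo k).map (fun i => pvD sb tb i * 2 ^ (lo + k - 1 - i))).sum := by
  intro k
  induction k using Nat.strong_induction_on with
  | _ k ih =>
    intro lo
    rw [pvSigned]
    rcases Nat.lt_or_ge k 2 with hk | hk
    · interval_cases k
      · simp
      · have hc : lo + 1 - lo = 1 := by omega
        have he : lo + 1 - 1 - lo = 0 := by omega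
        simp only [hc, List.range'_one, List.map_cons, List.map_nil, List.sum_cons,
          List.sum_nil, pvD, he, pow_zero, mul_one, add_zero]
        split_ifs <;> simp_all
    · have h0 : ¬ (lo + k - lo = 0) := by omega
      have h1 : ¬ (lo + k - lo = 1) := by omega
      simp only [h0, h1, if_false]
      have hmid : (lo + (lo + k)) / 2 = lo + k / 2 := by omega
      set k1 := k / 2 with hk1
      set k2 := k - k1 with hk2
      have hk1lt : k1 < k := by omega
      have hk2lt : k2 < k := by omega
      have hexp : lo + k - (lo + k1) = k2 := by omega
      have hhi : lo + k = lo + k1 + k2 := by omega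
      have hL := ih k1 hk1lt lo
      have hR := ih k2 hk2lt (lo + k1)
      rw [hmid, hexp, hhi, hR, hL]
      have hrange : List.range' lo k = List.range' lo k1 ++ List.range' (lo + k1) k2 := by
        have hk12 : k = k1 + k2 := by omega
        rw [hk12, ← List.range'_append_1]
      rw [hrange, List.map_append, List.sum_append]
      have hw : (List.range' lo k1).map (fun i => pvD sb tb i * 2 ^ (lo + k1 + k2 - 1 - i))
          = (List.range' lo k1).map (fun i => (pvD sb tb i * 2 ^ (lo + k1 - 1 - i)) * 2 ^ k2) := by
        apply List.map_congr_left
        intro i hi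
        have hi1 : lo ≤ i := (List.mem_range'_1.mp hi).1
        have hi2 : i < lo + k1 := (List.mem_range'_1.mp hi).2
        have hk1pos : 1 ≤ k1 := by omega
        have he : lo + k1 + k2 - 1 - i = (lo + k1 - 1 - i) + k2 := by omega
        rw [he, pow_add]; ring
      rw [hw, ← List.sum_map_mul_right]

-- ===== VERDICT =====
theorem make_same_length_spec : Claim_equal_make_same_length := by
  intro sb tb _ hpre
  simp only [Spec_make_same_length, make_same_length, make_same_length_alt]
  rw [pv_horner]
  have hsg := pv_signed_sum sb tb sb.length 0
  simp only [Nat.zero_add, ← List.range_eq_range'] at hsg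
  rw [hsg]
  rw [PySem.List.foldl_pyRange_pyGetD' (xs := tb) (a := (sb.length : Int))
      (d := (0 : Int)) (f := fun (m : Int) (v : Int) => if v = 1 then m + 1 else m)
      (init := |(0 : Int) * 2 ^ sb.length + ((List.range sb.length).map
        (fun i => pvD sb tb i * 2 ^ (sb.length - 1 - i))).sum|) (by positivity)]
  rw [PySem.List.foldl_ite_add_one]
  simp [PySem.List.count_eq, List.count]
  exact List.countP_congr (fun x _ => by simp)
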